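-- pv_equiv track=rewrite | github.com/ryanbegley96/visual_inspection_tool | visual_inspection_tool.py | detect_change_in_search_box
-- ===== SOURCE A (Python) =====
-- def detect_change_in_search_box(expression):
--
--     N = len(expression)
--     benchmark_str = "Not found"
--
--     has_match = False
--     for j in range(N):
--
--         part1 = expression[:j]
--         part2 = expression[j+1:]
--
--         if part1+part2 == benchmark_str:
--             has_match = True
--             break
--
--     return has_match
-- ===== SOURCE B (Python) =====
-- def detect_change_in_search_box(expression):
--     benchmark_str = "Not found"
--     if len(expression) != len(benchmark_str) + 1:
--         return False
--     i = 0
--     while i < len(benchmark_str) and expression[i] == benchmark_str[i]: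
--         i += 1
--     return expression[i+1:] == benchmark_str[i:]
-- ===== Notes on version B (the rewrite author's own statement) =====
-- stated objective: faster
-- what changed: Replaces the quadratic try-every-deletion loop (each iteration rebuilds and compares a whole candidate string) with a length check plus one linear scan to the first mismatch followed by a single suffix comparison.
import Mathlib
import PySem

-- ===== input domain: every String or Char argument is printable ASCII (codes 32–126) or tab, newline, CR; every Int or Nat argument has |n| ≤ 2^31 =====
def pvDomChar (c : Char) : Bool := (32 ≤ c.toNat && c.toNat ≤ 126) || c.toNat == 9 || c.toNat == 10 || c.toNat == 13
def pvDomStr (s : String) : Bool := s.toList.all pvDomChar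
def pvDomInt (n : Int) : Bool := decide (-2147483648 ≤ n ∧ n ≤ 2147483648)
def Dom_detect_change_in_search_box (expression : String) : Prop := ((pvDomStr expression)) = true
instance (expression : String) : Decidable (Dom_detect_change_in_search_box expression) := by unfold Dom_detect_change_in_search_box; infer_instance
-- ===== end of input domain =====

-- B replaces A's quadratic try-every-deletion loop by a length check plus one
-- linear scan to the first mismatch and a single suffix comparison (faster, asymptotic).

-- ===== PORT A =====
-- the for-j loop with its break: try j = 0,1,…,N-1, stop at the first hit
def pvLoopA (e : List Char) (t : List Char) : List Int → Bool
  | [] => false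
  | j :: js =>
    let part1 := PySem.List.slice e none (some j)
    let part2 := PySem.List.slice e (some (j + 1)) none
    if part1 ++ part2 = t then true else pvLoopA e t js

def detect_change_in_search_box (expression : String) : Bool :=
  let e := expression.toList
  let benchmark := "Not found".toList
  pvLoopA e benchmark (PySem.List.pyRange 0 (e.length : Int) 1)

-- ===== PORT B =====
-- the while loop advancing i past the matching prefix, then the suffix comparison
-- expression[i+1:] == benchmark_str[i:], walked structurally over both lists
def pvGoB : List Char → List Char → Bool
  | [], _ => false
  | _ :: es, [] => es = []
  | ec :: es, bc :: bs => if ec = bc then pvGoB es bs else es = bc :: bs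

def detect_change_in_search_box_alt (expression : String) : Bool :=
  let e := expression.toList
  let benchmark := "Not found".toList
  if e.length ≠ benchmark.length + 1 then false
  else pvGoB e benchmark

-- ===== PRECONDITION & SPEC =====
def Spec_detect_change_in_search_box (expression : String) (out : Bool) : Prop := out = detect_change_in_search_box_alt expression
instance (expression : String) (out : Bool) : Decidable (Spec_detect_change_in_search_box expression out) := by unfold Spec_detect_change_in_search_box; infer_instance

-- ===== CLAIM (what is proved, stated in full; the proofs are below) =====
def Claim_equal_detect_change_in_search_box : Prop := ∀ (expression : String), Dom_detect_change_in_search_box expression → Spec_detect_change_in_search_box expression (detect_change_in_search_box expression)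

-- ===== LEMMAS AND PROOFS =====

-- A's loop is an existence check over the candidate indices
theorem pvLoopA_eq_any (e t : List Char) (js : List Int) :
    pvLoopA e t js = js.any (fun j =>
      PySem.List.slice e none (some j) ++ PySem.List.slice e (some (j + 1)) none = t) := by
  induction js with
  | nil => rfl
  | cons j js ih =>
    simp only [pvLoopA, ih, List.any_cons]
    split_ifs with h <;> simp [h]

-- A returns true iff some single deletion of e gives t
theorem pvA_iff (e t : List Char) :
    pvLoopA e t (PySem.List.pyRange 0 (e.length : Int) 1) = true ↔
      ∃ j : Nat, j < e.length ∧ e.take j ++ e.drop (j + 1) = t := by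
  rw [pvLoopA_eq_any, PySem.List.pyRange_zero_natCast]
  simp only [List.any_map, List.any_eq_true, List.mem_range, Function.comp]
  constructor
  · rintro ⟨j, hj, hp⟩
    refine ⟨j, hj, ?_⟩
    have h1 : PySem.List.slice e none (some (j : Int)) = e.take j :=
      PySem.List.slice_to_natCast e j
    have h2 : PySem.List.slice e (some ((j : Int) + 1)) none = e.drop (j + 1) := by
      have := PySem.List.slice_from_natCast e (j + 1)
      push_cast at this ⊢
      exact this
    rw [h1, h2] at hp
    simpa using hp
  · rintro ⟨j, hj, hp⟩
    refine ⟨j, hj, ?_⟩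
    have h1 : PySem.List.slice e none (some (j : Int)) = e.take j :=
      PySem.List.slice_to_natCast e j
    have h2 : PySem.List.slice e (some ((j : Int) + 1)) none = e.drop (j + 1) := by
      have := PySem.List.slice_from_natCast e (j + 1)
      push_cast at this ⊢
      exact this
    rw [h1, h2]
    simpa using hp

-- B's scan returns true iff some single deletion of e gives b (when lengths fit)
theorem pvGoB_iff (e b : List Char) (hlen : e.length = b.length + 1) :
    pvGoB e b = true ↔ ∃ j : Nat, j < e.length ∧ e.take j ++ e.drop (j + 1) = b := by
  induction e generalizing b with
  | nil => simp at hlen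
  | cons ec es ih =>
    cases b with
    | nil =>
      simp only [pvGoB, decide_eq_true_eq]
      constructor
      · intro h; exact ⟨0, by simp, by simpa using h⟩
      · rintro ⟨j, hj, hp⟩
        cases j with
        | zero => simpa using hp
        | succ j => simp at hp
    | cons bc bs =>
      simp only [pvGoB]
      split_ifs with hc
      · subst hc
        rw [ih bs (by simpa using hlen)]
        constructor
        · rintro ⟨j, hj, hp⟩
          exact ⟨j + 1, by simpa using Nat.succ_lt_succ hj, by simp [hp]⟩
        · rintro ⟨j, hj, hp⟩
          cases j with
          | zero =>
            have h' : es = ec :: bs := by simpa using hp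
            exact ⟨0, by simp [h'], by simp [h']⟩
          | succ j =>
            simp only [List.take_succ_cons, List.drop_succ_cons, List.cons_append,
              List.cons.injEq] at hp
            exact ⟨j, by simpa using Nat.lt_of_succ_lt_succ hj, hp.2⟩
      · simp only [decide_eq_true_eq]
        constructor
        · intro h; exact ⟨0, by simp, by simpa using h⟩
        · rintro ⟨j, hj, hp⟩
          cases j with
          | zero => simpa using hp
          | succ j =>
            simp only [List.take_succ_cons, List.drop_succ_cons, List.cons_append,
              List.cons.injEq] at hp
            exact absurd hp.1 hc

-- if the lengths do not fit, no single deletion can give b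
theorem pvNoDel (e b : List Char) (hlen : e.length ≠ b.length + 1) :
    ¬ ∃ j : Nat, j < e.length ∧ e.take j ++ e.drop (j + 1) = b := by
  rintro ⟨j, hj, hp⟩
  have := congrArg List.length hp
  simp only [List.length_append, List.length_take, List.length_drop] at this
  omega

-- ===== VERDICT (by name: the statement is the Claim_ definition above) =====
theorem detect_change_in_search_box_spec : Claim_equal_detect_change_in_search_box := by
  intro expression _
  unfold Spec_detect_change_in_search_box detect_change_in_search_box detect_change_in_search_box_alt
  have hA := pvA_iff expression.toList "Not found".toList
  by_cases hl : expression.toList.length = "Not found".toList.length + 1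
  · rw [if_neg (by omega)]
    rw [Bool.eq_iff_iff, hA, pvGoB_iff _ _ hl]
  · rw [if_pos hl]
    rw [← Bool.not_eq_true, hA]
    exact pvNoDel _ _ hl
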